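-- pv_equiv track=rewrite | github.com/micr0cuts/challenges | advent-of-code-2015/solution14.py | solve
-- ===== SOURCE A (Python) =====
-- rest = []
--
-- def solve(s, d, rest, part2=False):
--     t = 0
--     dist = 0
--     times_up = False
--     while True:
--         if times_up:
--             break
--         for i in range(d):
--             t += 1
--             dist += s
--             if t >= 2503:
--                 times_up = True
--                 break
--             if part2:
--                 yield dist
--         for i in range(rest):
--             t += 1
--             if t >= 2503:
--                 times_up = True
--                 break
--             if part2:
--                 yield dist
--     yield dist
-- ===== SOURCE B (Python) =====
-- def solve(s, d, rest, part2=False):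
--     # Closed form: distance after t seconds, computed from full cycles + partial phase.
--     fly = max(d, 0)
--     cycle = fly + max(rest, 0)
--
--     def dist_at(t):
--         q = t // cycle
--         r = t - q * cycle
--         return s * (q * fly + min(r, fly))
--
--     if part2:
--         for t in range(1, 2504):
--             yield dist_at(t)
--     else:
--         yield dist_at(2503)
-- ===== Notes on version B (the rewrite author's own statement) =====
-- stated objective: alternative
-- what changed: Replaces A's nested flying/resting phase loops (a stateful second-by-second simulation with a times_up flag) by a closed-form distance formula (full cycles plus clamped partial phase, via floor division) evaluated at each requested second.
import Mathlib
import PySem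

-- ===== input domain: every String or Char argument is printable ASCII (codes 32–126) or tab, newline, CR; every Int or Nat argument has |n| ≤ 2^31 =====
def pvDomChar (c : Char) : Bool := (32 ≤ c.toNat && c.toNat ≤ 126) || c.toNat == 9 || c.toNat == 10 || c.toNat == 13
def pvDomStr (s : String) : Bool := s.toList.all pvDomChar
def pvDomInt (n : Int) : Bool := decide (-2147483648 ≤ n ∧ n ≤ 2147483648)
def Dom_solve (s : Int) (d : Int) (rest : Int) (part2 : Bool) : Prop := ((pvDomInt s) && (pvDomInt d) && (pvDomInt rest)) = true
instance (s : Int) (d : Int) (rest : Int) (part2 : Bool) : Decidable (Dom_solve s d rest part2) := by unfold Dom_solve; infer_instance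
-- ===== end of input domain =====

-- B replaces A's second-by-second nested phase simulation by a closed-form distance
-- formula evaluated per requested second (alternative decomposition).


-- ===== PORT A =====
-- inner 'for i in range(d)' flying loop: returns (t, dist, times_up, yielded-so-far)
def flyA (s : Int) (part2 : Bool) : Nat → Int → Int → List Int → Int × Int × Bool × List Int
  | 0, t, dist, acc => (t, dist, false, acc)
  | n + 1, t, dist, acc =>
    let t := t + 1
    let dist := dist + s
    if 2503 ≤ t then (t, dist, true, acc)
    else flyA s part2 n t dist (if part2 then acc ++ [dist] else acc)

-- inner 'for i in range(rest)' resting loop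
def restA (part2 : Bool) : Nat → Int → Int → List Int → Int × Int × Bool × List Int
  | 0, t, dist, acc => (t, dist, false, acc)
  | n + 1, t, dist, acc =>
    let t := t + 1
    if 2503 ≤ t then (t, dist, true, acc)
    else restA part2 n t dist (if part2 then acc ++ [dist] else acc)

-- the 'while True' loop; fuel only for totality (2503 suffices: under Pre_ every
-- iteration advances t by at least 1 and the loop stops once t reaches 2503)
def loopA (s d rest : Int) (part2 : Bool) : Nat → Bool → Int → Int → List Int → List Int
  | 0, _, _, dist, acc => acc ++ [dist]
  | _ + 1, true, _, dist, acc => acc ++ [dist]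
  | f + 1, false, t, dist, acc =>
    let r1 := flyA s part2 d.toNat t dist acc
    let r2 := restA part2 rest.toNat r1.1 r1.2.1 r1.2.2.2
    loopA s d rest part2 f (r1.2.2.1 || r2.2.2.1) r2.1 r2.2.1 r2.2.2.2

def solve (s : Int) (d : Int) (rest : Int) (part2 : Bool) : List Int :=
  loopA s d rest part2 2503 false 0 0 []

-- ===== PORT B =====
-- closed-form distance after t seconds (Source B's dist_at)
def distAt (s : Int) (d : Int) (rest : Int) (t : Int) : Int :=
  let fly := max d 0
  let cycle := fly + max rest 0
  let q := PySem.Int.floordiv t cycle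
  let r := t - q * cycle
  s * (q * fly + min r fly)

def solve_alt (s : Int) (d : Int) (rest : Int) (part2 : Bool) : List Int :=
  if part2 then (PySem.List.pyRange 1 2504 1).map (fun t => distAt s d rest t)
  else [distAt s d rest 2503]

-- ===== PRECONDITION & SPEC =====
-- Pre_ excludes exactly the inputs with d ≤ 0 and rest ≤ 0, on which A loops forever
-- (it never yields a value and never terminates); B raises ZeroDivisionError there.
def Pre_solve (s : Int) (d : Int) (rest : Int) (part2 : Bool) : Prop := 1 ≤ d ∨ 1 ≤ rest
instance (s : Int) (d : Int) (rest : Int) (part2 : Bool) : Decidable (Pre_solve s d rest part2) := by unfold Pre_solve; infer_instance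

def pvWitness_solve : Int × Int × Int × Bool := (14, 10, 127, true)

def Spec_solve (s : Int) (d : Int) (rest : Int) (part2 : Bool) (out : List Int) : Prop := out = solve_alt s d rest part2
instance (s : Int) (d : Int) (rest : Int) (part2 : Bool) (out : List Int) : Decidable (Spec_solve s d rest part2 out) := by unfold Spec_solve; infer_instance

-- ===== CLAIM (what is proved, stated in full; the proofs are below) =====
def Claim_equal_solve : Prop := ∀ (s : Int) (d : Int) (rest : Int) (part2 : Bool), Dom_solve s d rest part2 → Pre_solve s d rest part2 → Spec_solve s d rest part2 (solve s d rest part2)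

-- ===== LEMMAS AND PROOFS =====

-- characterization of the flying loop, entered with t0 < 2503
theorem flyA_spec (s : Int) (part2 : Bool) (n : Nat) :
    ∀ (t0 dist0 : Int) (acc : List Int), t0 < 2503 →
    flyA s part2 n t0 dist0 acc =
      if t0 + n < 2503 then
        (t0 + n, dist0 + n * s, false,
          acc ++ (if part2 then (PySem.List.pyRange (t0 + 1) (t0 + 1 + n) 1).map (fun u => dist0 + (u - t0) * s) else []))
      else
        (2503, dist0 + (2503 - t0) * s, true,
          acc ++ (if part2 then (PySem.List.pyRange (t0 + 1) 2503 1).map (fun u => dist0 + (u - t0) * s) else [])) := by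
  induction n with
  | zero =>
    intro t0 dist0 acc ht
    rw [flyA, if_pos (show t0 + ((0:Nat):Int) < 2503 by push_cast; omega)]
    rw [PySem.List.pyRange_one_eq_nil (by norm_num : (t0 + 1 + (0:Nat) : Int) ≤ t0 + 1)]
    cases part2 <;> simp
  | succ n ih =>
    intro t0 dist0 acc ht
    rw [flyA]
    have hc1 : (((n : Nat) + 1 : Nat) : Int) = (n : Int) + 1 := by push_cast; ring
    by_cases hbrk : (2503 : Int) ≤ t0 + 1
    · rw [if_pos hbrk, if_neg (show ¬ (t0 + (((n:Nat)+1:Nat):Int) < 2503) by rw [hc1]; omega)]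
      have h1 : t0 + 1 = (2503 : Int) := by omega
      have h2 : dist0 + s = dist0 + (2503 - t0) * s := by rw [show (2503 : Int) - t0 = 1 by omega]; ring
      rw [PySem.List.pyRange_one_eq_nil (by omega : (2503:Int) ≤ t0 + 1)]
      cases part2 <;> simp [h1, h2]
    · rw [if_neg hbrk, ih (t0 + 1) (dist0 + s) _ (by omega)]
      have hfe : (fun u => dist0 + s + (u - (t0 + 1)) * s) = (fun u : Int => dist0 + (u - t0) * s) :=
        funext fun u => by ring
      by_cases hend : t0 + 1 + (n : Int) < 2503
      · rw [if_pos hend, if_pos (show t0 + (((n:Nat)+1:Nat):Int) < 2503 by rw [hc1]; omega)]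
        simp only [Prod.mk.injEq, hfe]
        refine ⟨by rw [hc1]; ring, by rw [hc1]; ring, trivial, ?_⟩
        cases part2
        · simp
        · rw [PySem.List.pyRange_one_cons (by rw [hc1]; omega : t0 + 1 < t0 + 1 + (((n:Nat)+1:Nat) : Int)),
              List.map_cons]
          rw [show t0 + 1 + (((n:Nat)+1:Nat) : Int) = t0 + 1 + 1 + (n : Int) by rw [hc1]; ring]
          norm_num
      · rw [if_neg hend, if_neg (show ¬ (t0 + (((n:Nat)+1:Nat):Int) < 2503) by rw [hc1]; omega)]
        simp only [Prod.mk.injEq, hfe]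
        refine ⟨trivial, by ring, trivial, ?_⟩
        cases part2
        · simp
        · rw [PySem.List.pyRange_one_cons (by omega : t0 + 1 < 2503), List.map_cons]
          norm_num

-- characterization of the resting loop, entered with t0 < 2503
theorem restA_spec (part2 : Bool) (n : Nat) :
    ∀ (t0 dist0 : Int) (acc : List Int), t0 < 2503 →
    restA part2 n t0 dist0 acc =
      if t0 + n < 2503 then
        (t0 + n, dist0, false,
          acc ++ (if part2 then (PySem.List.pyRange (t0 + 1) (t0 + 1 + n) 1).map (fun _ => dist0) else []))
      else
        (2503, dist0, true,
          acc ++ (if part2 then (PySem.List.pyRange (t0 + 1) 2503 1).map (fun _ => dist0) else [])) := by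
  induction n with
  | zero =>
    intro t0 dist0 acc ht
    rw [restA, if_pos (show t0 + ((0:Nat):Int) < 2503 by push_cast; omega)]
    rw [PySem.List.pyRange_one_eq_nil (by norm_num : (t0 + 1 + (0:Nat) : Int) ≤ t0 + 1)]
    cases part2 <;> simp
  | succ n ih =>
    intro t0 dist0 acc ht
    rw [restA]
    have hc1 : (((n : Nat) + 1 : Nat) : Int) = (n : Int) + 1 := by push_cast; ring
    by_cases hbrk : (2503 : Int) ≤ t0 + 1
    · rw [if_pos hbrk, if_neg (show ¬ (t0 + (((n:Nat)+1:Nat):Int) < 2503) by rw [hc1]; omega)]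
      have h1 : t0 + 1 = (2503 : Int) := by omega
      rw [PySem.List.pyRange_one_eq_nil (by omega : (2503:Int) ≤ t0 + 1)]
      cases part2 <;> simp [h1]
    · rw [if_neg hbrk, ih (t0 + 1) dist0 _ (by omega)]
      by_cases hend : t0 + 1 + (n : Int) < 2503
      · rw [if_pos hend, if_pos (show t0 + (((n:Nat)+1:Nat):Int) < 2503 by rw [hc1]; omega)]
        simp only [Prod.mk.injEq]
        refine ⟨by rw [hc1]; ring, trivial, trivial, ?_⟩
        cases part2
        · simp
        · rw [PySem.List.pyRange_one_cons (show t0 + 1 < t0 + 1 + (((n:Nat)+1:Nat):Int) by rw [hc1]; omega),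
              List.map_cons]
          rw [show t0 + 1 + (((n:Nat)+1:Nat):Int) = t0 + 1 + 1 + (n : Int) by rw [hc1]; ring]
          simp
      · rw [if_neg hend, if_neg (show ¬ (t0 + (((n:Nat)+1:Nat):Int) < 2503) by rw [hc1]; omega)]
        simp only [Prod.mk.injEq]
        refine ⟨trivial, trivial, trivial, ?_⟩
        cases part2
        · simp
        · rw [PySem.List.pyRange_one_cons (show t0 + 1 < (2503:Int) by omega), List.map_cons]
          simp

-- resting loop entered after time is already up: dist and output are unchanged
theorem restA_high (part2 : Bool) (n : Nat) (t0 dist0 : Int) (acc : List Int) (h : 2503 ≤ t0) :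
    restA part2 n t0 dist0 acc =
      if n = 0 then (t0, dist0, false, acc) else (t0 + 1, dist0, true, acc) := by
  cases n with
  | zero => rfl
  | succ n => rw [restA, if_pos (by omega : (2503:Int) ≤ t0 + 1)]; simp

theorem loopA_true (s d rest : Int) (part2 : Bool) (f : Nat) (t dist : Int) (acc : List Int) :
    loopA s d rest part2 f true t dist acc = acc ++ [dist] := by
  cases f <;> rfl

-- the closed form during the flying phase of cycle k
theorem distAt_fly (s d rest : Int) (k i : Int)
    (h1 : 1 ≤ i) (h2 : i ≤ max d 0) :
    distAt s d rest (k * (max d 0 + max rest 0) + i) = s * (k * max d 0) + i * s := by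
  have hd0 : (0:Int) ≤ max d 0 := le_max_right d 0
  have hr0 : (0:Int) ≤ max rest 0 := le_max_right rest 0
  have hc : (0:Int) < max d 0 + max rest 0 := by omega
  simp only [distAt]
  rw [PySem.Int.floordiv_eq_ediv_of_pos hc]
  rcases lt_or_eq_of_le (show i ≤ max d 0 + max rest 0 by omega) with hlt | heq
  · have hq : (k * (max d 0 + max rest 0) + i) / (max d 0 + max rest 0) = k := by
      rw [show k * (max d 0 + max rest 0) + i = i + k * (max d 0 + max rest 0) by ring,
          Int.add_mul_ediv_right _ _ (by omega), Int.ediv_eq_zero_of_lt (by omega) hlt]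
      ring
    rw [hq]
    rw [show k * (max d 0 + max rest 0) + i - k * (max d 0 + max rest 0) = i by ring]
    rw [min_eq_left h2]; ring
  · -- i = cycle: only possible when max rest 0 = 0, so max d 0 = i = cycle
    have hrz : max rest 0 = 0 := by omega
    have hdi : max d 0 = i := by omega
    have hq : (k * (max d 0 + max rest 0) + i) / (max d 0 + max rest 0) = k + 1 := by
      rw [hrz, hdi]
      simp only [add_zero]
      rw [show k * i + i = 0 + (k + 1) * i by ring,
          Int.add_mul_ediv_right _ _ (by omega : i ≠ 0), Int.zero_ediv]
      ring
    rw [hq]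
    rw [show k * (max d 0 + max rest 0) + i - (k + 1) * (max d 0 + max rest 0)
          = i - (max d 0 + max rest 0) by ring]
    rw [min_eq_left (by omega : i - (max d 0 + max rest 0) ≤ max d 0)]
    rw [hrz, ← hdi]; ring

-- the closed form during the resting phase of cycle k (or at its end)
theorem distAt_rest (s d rest : Int) (k i : Int)
    (h1 : max d 0 < i) (h2 : i ≤ max d 0 + max rest 0) :
    distAt s d rest (k * (max d 0 + max rest 0) + i) = s * (k * max d 0) + max d 0 * s := by
  have hd0 : (0:Int) ≤ max d 0 := le_max_right d 0
  have hr0 : (0:Int) ≤ max rest 0 := le_max_right rest 0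
  have hc : (0:Int) < max d 0 + max rest 0 := by omega
  simp only [distAt]
  rw [PySem.Int.floordiv_eq_ediv_of_pos hc]
  rcases lt_or_eq_of_le h2 with hlt | heq
  · have hq : (k * (max d 0 + max rest 0) + i) / (max d 0 + max rest 0) = k := by
      rw [show k * (max d 0 + max rest 0) + i = i + k * (max d 0 + max rest 0) by ring,
          Int.add_mul_ediv_right _ _ (by omega), Int.ediv_eq_zero_of_lt (by omega) hlt]
      ring
    rw [hq]
    rw [show k * (max d 0 + max rest 0) + i - k * (max d 0 + max rest 0) = i by ring]
    rw [min_eq_right (le_of_lt h1)]; ring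
  · have hq : (k * (max d 0 + max rest 0) + i) / (max d 0 + max rest 0) = k + 1 := by
      rw [heq, show k * (max d 0 + max rest 0) + (max d 0 + max rest 0)
            = 0 + (k + 1) * (max d 0 + max rest 0) by ring,
          Int.add_mul_ediv_right _ _ (by omega), Int.zero_ediv]
      ring
    rw [hq]
    rw [show k * (max d 0 + max rest 0) + i - (k + 1) * (max d 0 + max rest 0)
          = i - (max d 0 + max rest 0) by ring]
    rw [min_eq_left (by omega : i - (max d 0 + max rest 0) ≤ max d 0)]
    rw [heq]; ring

-- main loop invariant: from the start of cycle k the output is the per-second map of distAt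
theorem loopA_spec (s d rest : Int) (part2 : Bool) (hc : 1 ≤ max d 0 + max rest 0) :
    ∀ (fuel : Nat) (k : Int) (acc : List Int), 0 ≤ k →
    k * (max d 0 + max rest 0) < 2503 →
    2503 - k * (max d 0 + max rest 0) ≤ (fuel : Int) →
    loopA s d rest part2 fuel false (k * (max d 0 + max rest 0)) (s * (k * max d 0)) acc =
      acc ++ (if part2 then (PySem.List.pyRange (k * (max d 0 + max rest 0) + 1) 2503 1).map (fun u => distAt s d rest u) else [])
          ++ [distAt s d rest 2503] := by
  have hd0 : (0:Int) ≤ max d 0 := le_max_right d 0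
  have hr0 : (0:Int) ≤ max rest 0 := le_max_right rest 0
  have hdn : ((d.toNat : Nat) : Int) = max d 0 := by omega
  have hrn : ((rest.toNat : Nat) : Int) = max rest 0 := by omega
  intro fuel
  induction fuel with
  | zero =>
    intro k acc hk hk2 hf
    exfalso; push_cast at hf; linarith
  | succ f ih =>
    intro k acc hk hk2 hf
    rw [loopA]
    rw [flyA_spec s part2 d.toNat _ _ _ hk2, hdn]
    by_cases hfb : k * (max d 0 + max rest 0) + max d 0 < 2503
    · rw [if_pos hfb]
      simp only
      rw [restA_spec part2 rest.toNat _ _ _ (by linarith), hrn]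
      by_cases hrb : k * (max d 0 + max rest 0) + max d 0 + max rest 0 < 2503
      · rw [if_pos hrb]
        simp only [Bool.or_false]
        rw [show k * (max d 0 + max rest 0) + max d 0 + max rest 0
              = (k + 1) * (max d 0 + max rest 0) by ring,
            show s * (k * max d 0) + max d 0 * s = s * ((k + 1) * max d 0) by ring]
        have hexp : (k + 1) * (max d 0 + max rest 0)
            = k * (max d 0 + max rest 0) + (max d 0 + max rest 0) := by ring
        rw [ih (k + 1) _ (by omega) (by linarith) (by push_cast at hf ⊢; linarith)]
        cases part2
        · simp
        · 
          have hm1 : ∀ u ∈ PySem.List.pyRange (k * (max d 0 + max rest 0) + 1)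
                (k * (max d 0 + max rest 0) + 1 + max d 0) 1,
              s * (k * max d 0) + (u - k * (max d 0 + max rest 0)) * s = distAt s d rest u := by
            intro u hu
            rw [PySem.List.mem_pyRange_one] at hu
            have h := distAt_fly s d rest k (u - k * (max d 0 + max rest 0))
              (by linarith) (by linarith)
            rw [show k * (max d 0 + max rest 0) + (u - k * (max d 0 + max rest 0)) = u by ring] at h
            exact h.symm
          have hm2 : ∀ u ∈ PySem.List.pyRange (k * (max d 0 + max rest 0) + max d 0 + 1)
                (k * (max d 0 + max rest 0) + max d 0 + 1 + max rest 0) 1,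
              s * ((k + 1) * max d 0) = distAt s d rest u := by
            intro u hu
            rw [PySem.List.mem_pyRange_one] at hu
            have h := distAt_rest s d rest k (u - k * (max d 0 + max rest 0))
              (by linarith) (by linarith)
            rw [show k * (max d 0 + max rest 0) + (u - k * (max d 0 + max rest 0)) = u by ring] at h
            rw [h]; ring
          rw [List.map_congr_left hm1, List.map_congr_left hm2]
          rw [show k * (max d 0 + max rest 0) + max d 0 + 1
                = k * (max d 0 + max rest 0) + 1 + max d 0 by ring]
          rw [show (k + 1) * (max d 0 + max rest 0) + 1
                = k * (max d 0 + max rest 0) + 1 + max d 0 + max rest 0 by ring]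
          rw [PySem.List.pyRange_one_append (k * (max d 0 + max rest 0) + 1)
              (k * (max d 0 + max rest 0) + 1 + max d 0) 2503 (by linarith) (by linarith),
            PySem.List.pyRange_one_append (k * (max d 0 + max rest 0) + 1 + max d 0)
              (k * (max d 0 + max rest 0) + 1 + max d 0 + max rest 0) 2503 (by linarith) (by linarith),
            List.map_append, List.map_append]
          rw [show k * (max d 0 + max rest 0) + 1 + max d 0 + max rest 0
                = k * (max d 0 + max rest 0) + max d 0 + 1 + max rest 0 by ring]
          simp [List.append_assoc]
      · rw [if_neg hrb]
        simp only [Bool.or_true]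
        rw [loopA_true]
        have hD : distAt s d rest 2503 = s * (k * max d 0) + max d 0 * s := by
          have h := distAt_rest s d rest k (2503 - k * (max d 0 + max rest 0))
            (by linarith) (by linarith)
          rw [show k * (max d 0 + max rest 0) + (2503 - k * (max d 0 + max rest 0))
                = (2503 : Int) by ring] at h
          exact h
        cases part2
        · simp [hD]
        · 
          have hm1 : ∀ u ∈ PySem.List.pyRange (k * (max d 0 + max rest 0) + 1)
                (k * (max d 0 + max rest 0) + 1 + max d 0) 1,
              s * (k * max d 0) + (u - k * (max d 0 + max rest 0)) * s = distAt s d rest u := by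
            intro u hu
            rw [PySem.List.mem_pyRange_one] at hu
            have h := distAt_fly s d rest k (u - k * (max d 0 + max rest 0))
              (by linarith) (by linarith)
            rw [show k * (max d 0 + max rest 0) + (u - k * (max d 0 + max rest 0)) = u by ring] at h
            exact h.symm
          have hm2 : ∀ u ∈ PySem.List.pyRange (k * (max d 0 + max rest 0) + max d 0 + 1) 2503 1,
              s * (k * max d 0) + max d 0 * s = distAt s d rest u := by
            intro u hu
            rw [PySem.List.mem_pyRange_one] at hu
            have h := distAt_rest s d rest k (u - k * (max d 0 + max rest 0))
              (by linarith) (by linarith)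
            rw [show k * (max d 0 + max rest 0) + (u - k * (max d 0 + max rest 0)) = u by ring] at h
            exact h.symm
          rw [List.map_congr_left hm1, List.map_congr_left hm2]
          rw [show k * (max d 0 + max rest 0) + max d 0 + 1
                = k * (max d 0 + max rest 0) + 1 + max d 0 by ring]
          rw [PySem.List.pyRange_one_append (k * (max d 0 + max rest 0) + 1)
              (k * (max d 0 + max rest 0) + 1 + max d 0) 2503 (by linarith) (by linarith),
            List.map_append]
          simp [List.append_assoc, hD]
    · rw [if_neg hfb]
      simp only
      rw [restA_high part2 rest.toNat _ _ _ (by norm_num)]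
      have hD : distAt s d rest 2503 = s * (k * max d 0) + (2503 - k * (max d 0 + max rest 0)) * s := by
        have h := distAt_fly s d rest k (2503 - k * (max d 0 + max rest 0))
          (by linarith) (by linarith)
        rw [show k * (max d 0 + max rest 0) + (2503 - k * (max d 0 + max rest 0))
              = (2503 : Int) by ring] at h
        exact h
      by_cases hn : rest.toNat = 0
      · rw [if_pos hn]
        simp only [Bool.true_or]
        rw [loopA_true]
        cases part2
        · simp [hD]
        · 
          have hm1 : ∀ u ∈ PySem.List.pyRange (k * (max d 0 + max rest 0) + 1) 2503 1,
              s * (k * max d 0) + (u - k * (max d 0 + max rest 0)) * s = distAt s d rest u := by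
            intro u hu
            rw [PySem.List.mem_pyRange_one] at hu
            have h := distAt_fly s d rest k (u - k * (max d 0 + max rest 0))
              (by linarith) (by linarith)
            rw [show k * (max d 0 + max rest 0) + (u - k * (max d 0 + max rest 0)) = u by ring] at h
            exact h.symm
          rw [List.map_congr_left hm1]
          simp [List.append_assoc, hD]
      · rw [if_neg hn]
        simp only [Bool.true_or]
        rw [loopA_true]
        cases part2
        · simp [hD]
        · 
          have hm1 : ∀ u ∈ PySem.List.pyRange (k * (max d 0 + max rest 0) + 1) 2503 1,
              s * (k * max d 0) + (u - k * (max d 0 + max rest 0)) * s = distAt s d rest u := by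
            intro u hu
            rw [PySem.List.mem_pyRange_one] at hu
            have h := distAt_fly s d rest k (u - k * (max d 0 + max rest 0))
              (by linarith) (by linarith)
            rw [show k * (max d 0 + max rest 0) + (u - k * (max d 0 + max rest 0)) = u by ring] at h
            exact h.symm
          rw [List.map_congr_left hm1]
          simp [List.append_assoc, hD]

-- ===== VERDICT (by name: the statement is the Claim_ definition above) =====
theorem solve_spec : Claim_equal_solve := by
  intro s d rest part2 _hdom hpre
  unfold Spec_solve solve solve_alt
  have hc : (1:Int) ≤ max d 0 + max rest 0 := by
    have h1 : d ≤ max d 0 := le_max_left d 0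
    have h2 : rest ≤ max rest 0 := le_max_left rest 0
    have h3 : (0:Int) ≤ max d 0 := le_max_right d 0
    have h4 : (0:Int) ≤ max rest 0 := le_max_right rest 0
    rcases hpre with h | h <;> omega
  have h0 := loopA_spec s d rest part2 hc 2503 0 []
    le_rfl (by simp) (by push_cast; simp)
  simp only [zero_mul, mul_zero, zero_add] at h0
  rw [h0]
  cases part2
  · simp
  · 
    rw [show (2504:Int) = 2503 + 1 by norm_num,
        PySem.List.pyRange_one_succ_right (by norm_num : (1:Int) ≤ 2503), List.map_append]
    simp
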